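-- pv_equiv track=rewrite | github.com/nike3096-hub/jarvis | core/conversation.py | _trim_by_characters
-- ===== SOURCE A (Python) =====
-- from typing import List, Dict, Optional
--
-- def _trim_by_characters(messages: List[Dict], max_chars: int) -> List[Dict]:
--     """
--     Trim messages to fit within character limit
--
--     Args:
--         messages: List of messages
--         max_chars: Maximum total characters
--
--     Returns:
--         Trimmed list of messages
--     """
--     total_chars = 0
--     trimmed = []
--
--     # Work backwards to keep most recent messages
--     for msg in reversed(messages):
--         content_len = len(msg.get("content", ""))
--         if total_chars + content_len > max_chars:
--             break
--         total_chars += content_len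
--         trimmed.insert(0, msg)
--
--     return trimmed
-- ===== SOURCE B (Python) =====
-- def _trim_by_characters(messages, max_chars):
--     # Forward pass: prefix sums of content lengths, then find the cut index and slice.
--     prefix = [0]
--     for m in messages:
--         prefix.append(prefix[-1] + len(m.get("content", "")))
--     total = prefix[-1]
--     i = 0
--     while i < len(messages) and total - prefix[i] > max_chars:
--         i += 1
--     return messages[i:]
-- ===== Notes on version B (the rewrite author's own statement) =====
-- stated objective: alternative
-- what changed: Replaces A's backward early-breaking loop with insert(0) by a forward prefix-sum pass plus a forward scan for the cut index, returning a single slice.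
import Mathlib
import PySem

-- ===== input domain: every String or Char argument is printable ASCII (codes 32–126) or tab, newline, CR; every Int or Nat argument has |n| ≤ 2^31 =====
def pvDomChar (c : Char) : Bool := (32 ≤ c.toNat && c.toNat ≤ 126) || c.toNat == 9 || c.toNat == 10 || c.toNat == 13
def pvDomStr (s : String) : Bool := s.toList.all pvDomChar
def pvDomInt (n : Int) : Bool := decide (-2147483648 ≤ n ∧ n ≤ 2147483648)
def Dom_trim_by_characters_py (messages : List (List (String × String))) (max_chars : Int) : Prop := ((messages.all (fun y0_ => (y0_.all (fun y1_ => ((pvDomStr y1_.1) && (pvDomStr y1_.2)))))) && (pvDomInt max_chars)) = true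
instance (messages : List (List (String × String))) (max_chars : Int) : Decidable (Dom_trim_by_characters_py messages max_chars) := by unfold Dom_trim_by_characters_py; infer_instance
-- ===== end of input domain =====

-- B replaces A's backward early-breaking loop with insert(0) by a forward prefix-sum pass
-- plus a forward cut-index scan and a single slice (objective: alternative decomposition).

-- ===== PORT A =====
-- len(msg.get("content", "")): dict is an association list, lookup = first match
def pvContentLen (msg : List (String × String)) : Int :=
  PySem.Str.len (((msg.find? (fun kv => kv.1 == "content")).map Prod.snd).getD "")

-- for msg in reversed(messages): break / total += …; trimmed.insert(0, msg)
def pvTrimALoop (max_chars : Int) : List (List (String × String)) → Int → List (List (String × String)) → List (List (String × String))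
  | [], _, trimmed => trimmed
  | msg :: rest, total, trimmed =>
    let contentLen := pvContentLen msg
    if total + contentLen > max_chars then trimmed
    else pvTrimALoop max_chars rest (total + contentLen) (msg :: trimmed)

def trim_by_characters_py (messages : List (List (String × String))) (max_chars : Int) : List (List (String × String)) :=
  pvTrimALoop max_chars messages.reverse 0 []

-- ===== PORT B =====
-- prefix = [0]; for m in messages: prefix.append(prefix[-1] + len(m.get("content","")))
def pvPrefixSums : List (List (String × String)) → Int → List Int
  | [], acc => [acc]
  | m :: rest, acc => acc :: pvPrefixSums rest (acc + pvContentLen m)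

-- while i < len(messages) and total - prefix[i] > max_chars: i += 1 ; return messages[i:]
-- (walks prefix and messages in lockstep; the slice is the remaining messages)
def pvDropLoop (total max_chars : Int) : List Int → List (List (String × String)) → List (List (String × String))
  | _, [] => []
  | [], ms => ms
  | p :: ps, m :: ms => if total - p > max_chars then pvDropLoop total max_chars ps ms else m :: ms

def trim_by_characters_py_alt (messages : List (List (String × String))) (max_chars : Int) : List (List (String × String)) :=
  let pre := pvPrefixSums messages 0
  let total := pre.getLastD 0
  pvDropLoop total max_chars pre messages

-- ===== PRECONDITION & SPEC =====
def Spec_trim_by_characters_py (messages : List (List (String × String))) (max_chars : Int) (out : List (List (String × String))) : Prop := out = trim_by_characters_py_alt messages max_chars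
instance (messages : List (List (String × String))) (max_chars : Int) (out : List (List (String × String))) : Decidable (Spec_trim_by_characters_py messages max_chars out) := by unfold Spec_trim_by_characters_py; infer_instance

-- ===== CLAIM (what is proved, stated in full; the proofs are below) =====
def Claim_equal_trim_by_characters_py : Prop := ∀ (messages : List (List (String × String))) (max_chars : Int), Dom_trim_by_characters_py messages max_chars → Spec_trim_by_characters_py messages max_chars (trim_by_characters_py messages max_chars)

-- ===== LEMMAS AND PROOFS =====

def pvSumLens (l : List (List (String × String))) : Int := (l.map pvContentLen).sum

-- budget-takeWhile: the messages A keeps, listed in processing order (end-first)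
def pvKeep (b : Int) : List (List (String × String)) → List (List (String × String))
  | [] => []
  | m :: r => if pvContentLen m > b then [] else m :: pvKeep (b - pvContentLen m) r

-- common spec: the longest suffix whose total length fits
def pvS (max_chars : Int) : List (List (String × String)) → List (List (String × String))
  | [] => []
  | m :: ms => if pvSumLens (m :: ms) ≤ max_chars then m :: ms else pvS max_chars ms

theorem pvContentLen_nonneg (m : List (String × String)) : 0 ≤ pvContentLen m := by
  simp [pvContentLen, PySem.Str.len_eq]

theorem pvSumLens_nonneg (l : List (List (String × String))) : 0 ≤ pvSumLens l := by
  induction l with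
  | nil => simp [pvSumLens]
  | cons m ms ih =>
    have := pvContentLen_nonneg m
    simp only [pvSumLens, List.map_cons, List.sum_cons] at *
    omega

theorem pvSumLens_reverse (l : List (List (String × String))) : pvSumLens l.reverse = pvSumLens l := by
  simp [pvSumLens, List.map_reverse, List.sum_reverse]

theorem pvTrimALoop_eq_keep (max_chars : Int) (rev : List (List (String × String))) :
    ∀ total trimmed, pvTrimALoop max_chars rev total trimmed = (pvKeep (max_chars - total) rev).reverse ++ trimmed := by
  induction rev with
  | nil => intro total trimmed; simp [pvTrimALoop, pvKeep]
  | cons m r ih =>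
    intro total trimmed
    simp only [pvTrimALoop, pvKeep]
    by_cases h : total + pvContentLen m > max_chars
    · rw [if_pos h, if_pos (by omega)]
      simp
    · rw [if_neg h, if_neg (by omega), ih]
      have : max_chars - (total + pvContentLen m) = max_chars - total - pvContentLen m := by ring
      rw [this]
      simp

theorem pvKeep_of_sum_le (l : List (List (String × String))) :
    ∀ b, pvSumLens l ≤ b → pvKeep b l = l := by
  induction l with
  | nil => intro b _; simp [pvKeep]
  | cons m r ih =>
    intro b h
    have hs := pvSumLens_nonneg r
    simp only [pvSumLens, List.map_cons, List.sum_cons] at h hs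
    simp only [pvKeep]
    rw [if_neg (by omega)]
    rw [ih _ (by simp only [pvSumLens]; omega)]

theorem pvKeep_snoc (m : List (String × String)) (l : List (List (String × String))) :
    ∀ b, pvKeep b (l ++ [m]) =
      if pvKeep b l = l ∧ pvContentLen m ≤ b - pvSumLens l then l ++ [m] else pvKeep b l := by
  induction l with
  | nil =>
    intro b
    simp only [List.nil_append, pvKeep, pvSumLens, List.map_nil, List.sum_nil]
    split_ifs with h1 h2 h2 <;> simp_all <;> omega
  | cons x xs ih =>
    intro b
    simp only [List.cons_append, pvKeep]
    by_cases hx : pvContentLen x > b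
    · rw [if_pos hx, if_pos hx]
      rw [if_neg]
      rintro ⟨h1, -⟩
      exact (List.cons_ne_nil x xs).symm h1
    · rw [if_neg hx, if_neg hx, ih]
      have hsum : pvSumLens (x :: xs) = pvContentLen x + pvSumLens xs := by
        simp [pvSumLens]
      by_cases hk : pvKeep (b - pvContentLen x) xs = xs ∧ pvContentLen m ≤ (b - pvContentLen x) - pvSumLens xs
      · rw [if_pos hk, if_pos]
        refine ⟨by rw [hk.1], ?_⟩
        rw [hsum]; have := hk.2; omega
      · rw [if_neg hk, if_neg]
        rintro ⟨h1, h2⟩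
        simp only [List.cons.injEq, true_and] at h1
        exact hk ⟨h1, by rw [hsum] at h2; omega⟩

theorem pvA_eq_S (max_chars : Int) (msgs : List (List (String × String))) :
    (pvKeep max_chars msgs.reverse).reverse = pvS max_chars msgs := by
  induction msgs with
  | nil => simp [pvKeep, pvS]
  | cons m ms ih =>
    rw [List.reverse_cons, pvKeep_snoc]
    have hrev : pvSumLens ms.reverse = pvSumLens ms := pvSumLens_reverse ms
    have hsum : pvSumLens (m :: ms) = pvContentLen m + pvSumLens ms := by simp [pvSumLens]
    simp only [pvS]
    by_cases h : pvSumLens (m :: ms) ≤ max_chars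
    · rw [if_pos h]
      have hms : pvSumLens ms ≤ max_chars := by
        have := pvContentLen_nonneg m; omega
      rw [if_pos ⟨pvKeep_of_sum_le _ _ (hrev.trans_le hms), by rw [hrev]; omega⟩]
      simp
    · rw [if_neg h, if_neg, ih]
      rintro ⟨-, h2⟩
      rw [hrev] at h2
      omega

theorem pvPrefixSums_last (msgs : List (List (String × String))) :
    ∀ acc d, (pvPrefixSums msgs acc).getLastD d = acc + pvSumLens msgs := by
  induction msgs with
  | nil => intro acc d; simp [pvPrefixSums, pvSumLens]
  | cons m ms ih =>
    intro acc d
    simp only [pvPrefixSums, List.getLastD_cons, ih]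
    simp only [pvSumLens, List.map_cons, List.sum_cons]
    ring

theorem pvB_eq_S (max_chars : Int) (msgs : List (List (String × String))) :
    ∀ acc, pvDropLoop (acc + pvSumLens msgs) max_chars (pvPrefixSums msgs acc) msgs = pvS max_chars msgs := by
  induction msgs with
  | nil => intro acc; simp [pvPrefixSums, pvDropLoop, pvS]
  | cons m ms ih =>
    intro acc
    have hsum : pvSumLens (m :: ms) = pvContentLen m + pvSumLens ms := by simp [pvSumLens]
    simp only [pvPrefixSums, pvDropLoop, pvS]
    by_cases h : pvSumLens (m :: ms) ≤ max_chars
    · rw [if_neg (by omega), if_pos h]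
    · rw [if_pos (by omega), if_neg h]
      have : acc + pvSumLens (m :: ms) = (acc + pvContentLen m) + pvSumLens ms := by
        rw [hsum]; ring
      rw [this, ih]

-- ===== VERDICT (by name: the statement is the Claim_ definition above) =====
theorem trim_by_characters_py_spec : Claim_equal_trim_by_characters_py := by
  intro messages max_chars _
  unfold Spec_trim_by_characters_py trim_by_characters_py
  simp only [trim_by_characters_py_alt]
  rw [pvTrimALoop_eq_keep]
  simp only [List.append_nil, Int.sub_zero]
  rw [pvA_eq_S, pvPrefixSums_last, pvB_eq_S max_chars messages 0]
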